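-- pv_equiv track=rewrite | github.com/Nghia03092004/nghia03092004.github.io | project_euler_unified/problem_561/solution.py | solve
-- ===== SOURCE A (Python) =====
-- from math import isqrt
--
-- def solve(N):
--     M = isqrt(N)
--     # Ensure M = floor(sqrt(N)) exactly
--     while (M + 1) * (M + 1) <= N:
--         M += 1
--     while M * M > N:
--         M -= 1
--
--     # Block decomposition: sum_{d=1}^{M} floor(N/d)
--     T = 0
--     d = 1
--     while d <= M:
--         q = N // d
--         d_max = min(N // q, M)
--         T += q * (d_max - d + 1)
--         d = d_max + 1
--
--     sum_tau = 2 * T - M * M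
--     return (sum_tau + M) // 2
-- ===== SOURCE B (Python) =====
-- from math import isqrt
--
--
-- def solve(N):
--     M = isqrt(N)
--     T = sum(N // d for d in range(1, M + 1))
--     return (2 * T - M * M + M) // 2
-- ===== Notes on version B (the rewrite author's own statement) =====
-- stated objective: simpler
-- what changed: B drops A's isqrt-adjustment loops and replaces the block-decomposition while-loop (grouping equal quotients and jumping d to min(N//q,M)+1) with a plain unit-step summation of N//d over d = 1..isqrt(N).
import Mathlib
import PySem

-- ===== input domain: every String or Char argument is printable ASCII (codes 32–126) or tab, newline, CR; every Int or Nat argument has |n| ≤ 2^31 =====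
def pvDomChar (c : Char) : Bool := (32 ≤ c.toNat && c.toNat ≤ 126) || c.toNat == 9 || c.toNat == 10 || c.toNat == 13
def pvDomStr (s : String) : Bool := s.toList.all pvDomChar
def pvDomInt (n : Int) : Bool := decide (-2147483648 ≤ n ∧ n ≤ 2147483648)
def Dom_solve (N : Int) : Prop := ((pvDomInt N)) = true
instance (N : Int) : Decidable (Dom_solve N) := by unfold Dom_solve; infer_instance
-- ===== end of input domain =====

-- B replaces A's block-decomposition loop (grouping equal quotients and jumping
-- d to min(N//q,M)+1) by a plain unit-step sum of N//d for d = 1..isqrt(N), and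
-- drops the isqrt-adjustment loops; objective: simpler.

-- ===== PORT A =====
-- `while (M + 1) * (M + 1) <= N: M += 1`
def solveUp (N M : Int) : Int :=
  if _h : (M + 1) * (M + 1) ≤ N then solveUp N (M + 1) else M
termination_by (N - M).toNat
decreasing_by
  have hle : M + 1 ≤ N := by nlinarith [sq_nonneg (2 * M + 1)]
  omega

-- `while M * M > N: M -= 1`; M is nonnegative here (it came from isqrt), so it
-- is carried as a Nat; the loop in Python never goes below 0 on the admitted
-- inputs (N ≥ 0), matching the base case.
def solveDown (N : Int) : Nat → Int
  | 0 => 0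
  | m + 1 => if ((m : Int) + 1) * ((m : Int) + 1) > N then solveDown N m else (m : Int) + 1

-- the block-decomposition while-loop; fuel only makes the recursion total
-- (each real iteration advances d by at least 1, so M.toNat + 1 suffices)
def blockLoop (N M : Int) : Nat → Int → Int → Int
  | 0, _, T => T
  | fuel + 1, d, T =>
    if d ≤ M then
      let q := PySem.Int.floordiv N d
      let dmax := min (PySem.Int.floordiv N q) M
      blockLoop N M fuel (dmax + 1) (T + q * (dmax - d + 1))
    else T

def solve (N : Int) : Int :=
  -- isqrt raises ValueError for N < 0: excluded by Pre_solve
  let M0 : Int := (Nat.sqrt N.toNat : Int)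
  let M1 := solveUp N M0
  let M := solveDown N M1.toNat
  let T := blockLoop N M (M.toNat + 1) 1 0
  let sumTau := 2 * T - M * M
  PySem.Int.floordiv (sumTau + M) 2

-- ===== PORT B =====
def solve_alt (N : Int) : Int :=
  -- isqrt raises ValueError for N < 0: excluded by Pre_solve
  let M : Int := (Nat.sqrt N.toNat : Int)
  let T := (PySem.List.pyRange 1 (M + 1)).foldl
    (fun acc d => acc + PySem.Int.floordiv N d) 0
  PySem.Int.floordiv (2 * T - M * M + M) 2

-- ===== PRECONDITION & SPEC =====
-- A (and B) raise ValueError via isqrt on negative N; Pre_ excludes exactly those.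
def Pre_solve (N : Int) : Prop := 0 ≤ N
instance (N : Int) : Decidable (Pre_solve N) := by unfold Pre_solve; infer_instance

def pvWitness_solve : Int := 10

def Spec_solve (N : Int) (out : Int) : Prop := out = solve_alt N
instance (N : Int) (out : Int) : Decidable (Spec_solve N out) := by unfold Spec_solve; infer_instance

-- ===== CLAIM (what is proved, stated in full; the proofs are below) =====
def Claim_equal_solve : Prop := ∀ (N : Int), Dom_solve N → Pre_solve N → Spec_solve N (solve N)

-- ===== LEMMAS AND PROOFS =====

-- sum of N // e over e = d, d+1, …, d+k-1 (proof-side reference sum)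
def sumFrom (N : Int) : Nat → Int → Int
  | 0, _ => 0
  | k + 1, d => PySem.Int.floordiv N d + sumFrom N k (d + 1)

theorem floordiv_cast (n : Nat) (b : Int) (hb : 0 < b) :
    PySem.Int.floordiv (n : Int) b = ((n / b.toNat : Nat) : Int) := by
  have h : ((b.toNat : Nat) : Int) = b := by omega
  rw [← h, PySem.Int.floordiv_natCast]
  simp

theorem floordiv_nn (n : Nat) (b : Int) (hb : 0 < b) :
    0 ≤ PySem.Int.floordiv (n : Int) b := by
  rw [floordiv_cast n b hb]; positivity

theorem le_floordiv (n : Nat) (a b : Int) (hb : 0 < b) (ha : 0 ≤ a)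
    (h : a * b ≤ (n : Int)) : a ≤ PySem.Int.floordiv (n : Int) b := by
  rw [floordiv_cast n b hb]
  have h1 : a.toNat * b.toNat ≤ n := by
    have h2 : ((a.toNat * b.toNat : Nat) : Int) ≤ (n : Int) := by
      push_cast
      rw [Int.toNat_of_nonneg ha, Int.toNat_of_nonneg hb.le]
      exact h
    exact_mod_cast h2
  have := (Nat.le_div_iff_mul_le (by omega : 0 < b.toNat)).2 h1
  omega

theorem floordiv_mul_le (n : Nat) (b : Int) (hb : 0 < b) :
    PySem.Int.floordiv (n : Int) b * b ≤ (n : Int) := by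
  rw [floordiv_cast n b hb]
  have h := Nat.div_mul_le_self n b.toNat
  have hb' : ((b.toNat : Nat) : Int) = b := by omega
  rw [← hb']
  exact_mod_cast h

theorem floordiv_le_floordiv (n : Nat) (d e : Int) (hd : 0 < d) (hde : d ≤ e) :
    PySem.Int.floordiv (n : Int) e ≤ PySem.Int.floordiv (n : Int) d := by
  have he : 0 < e := by omega
  rw [floordiv_cast n d hd, floordiv_cast n e he]
  have h3 : n / e.toNat ≤ n / d.toNat :=
    Nat.div_le_div_left (by omega : d.toNat ≤ e.toNat) (by omega : 0 < d.toNat)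
  exact_mod_cast h3

-- the quotient is constant on a block: d ≤ e and e * (n // d) ≤ n give n // e = n // d
theorem floordiv_block (n : Nat) (d e q : Int) (hd : 0 < d) (hde : d ≤ e)
    (hq : q = PySem.Int.floordiv (n : Int) d) (he : e * q ≤ (n : Int)) :
    PySem.Int.floordiv (n : Int) e = q := by
  have he0 : 0 < e := by omega
  have h1 : PySem.Int.floordiv (n : Int) e ≤ q := hq ▸ floordiv_le_floordiv n d e hd hde
  have hq0 : 0 ≤ q := hq ▸ floordiv_nn n d hd
  have h2 : q ≤ PySem.Int.floordiv (n : Int) e :=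
    le_floordiv n q e he0 hq0 (by nlinarith)
  omega

theorem sumFrom_split (N : Int) (k1 k2 : Nat) (d : Int) :
    sumFrom N (k1 + k2) d = sumFrom N k1 d + sumFrom N k2 (d + k1) := by
  induction k1 generalizing d with
  | zero => simp [sumFrom]
  | succ k ih =>
      have hsw : k + 1 + k2 = (k + k2) + 1 := by omega
      rw [hsw]
      simp only [sumFrom]
      rw [ih (d + 1)]
      have harg : d + 1 + (k : Int) = d + ((k + 1 : Nat) : Int) := by push_cast; ring
      rw [harg]
      ring

theorem sumFrom_const (N q : Int) (k : Nat) (d : Int)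
    (h : ∀ e : Int, d ≤ e → e < d + k → PySem.Int.floordiv N e = q) :
    sumFrom N k d = q * k := by
  induction k generalizing d with
  | zero => simp [sumFrom]
  | succ k ih =>
      have h0 : PySem.Int.floordiv N d = q := h d le_rfl (by push_cast; omega)
      have hrest : sumFrom N k (d + 1) = q * k :=
        ih (d + 1) (fun e he1 he2 => h e (by omega) (by push_cast at he2 ⊢; omega))
      simp only [sumFrom, h0, hrest]
      push_cast
      ring

-- A's block loop computes the same reference sum
theorem blockLoop_eq (n : Nat) (M : Int) (hM : M * M ≤ (n : Int)) :
    ∀ (fuel : Nat) (d T : Int), 1 ≤ d → (M + 1 - d).toNat ≤ fuel →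
      blockLoop (n : Int) M fuel d T = T + sumFrom (n : Int) (M + 1 - d).toNat d := by
  intro fuel
  induction fuel with
  | zero =>
      intro d T _ hf
      have h0 : (M + 1 - d).toNat = 0 := by omega
      simp [blockLoop, h0, sumFrom]
  | succ fuel ih =>
      intro d T hd hf
      by_cases hdM : d ≤ M
      · have hd2 : d * d ≤ (n : Int) := by nlinarith
        set q := PySem.Int.floordiv (n : Int) d with hq
        have hqd : d ≤ q := hq ▸ le_floordiv n d d (by omega) (by omega) hd2
        have hq1 : 1 ≤ q := by omega
        have hqmul : q * d ≤ (n : Int) := hq ▸ floordiv_mul_le n d (by omega)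
        set dmax := min (PySem.Int.floordiv (n : Int) q) M with hdmax
        have hnq : d ≤ PySem.Int.floordiv (n : Int) q :=
          le_floordiv n d q (by omega) (by omega) (by nlinarith)
        have hddmax : d ≤ dmax := le_min hnq hdM
        have hdmaxM : dmax ≤ M := min_le_right _ _
        have hconst : ∀ e : Int, d ≤ e → e < d + ((dmax + 1 - d).toNat : Int) →
            PySem.Int.floordiv (n : Int) e = q := by
          intro e he1 he2
          apply floordiv_block n d e q (by omega) he1 hq
          have hedm : e ≤ dmax := by omega
          have hef : e ≤ PySem.Int.floordiv (n : Int) q :=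
            hedm.trans (min_le_left _ _)
          have hstep : e * q ≤ PySem.Int.floordiv (n : Int) q * q :=
            mul_le_mul_of_nonneg_right hef (by omega)
          exact hstep.trans (floordiv_mul_le n q (by omega))
        have hsplit : (M + 1 - d).toNat = (dmax + 1 - d).toNat + (M + 1 - (dmax + 1)).toNat := by
          omega
        have hblock : sumFrom (n : Int) (dmax + 1 - d).toNat d = q * ((dmax + 1 - d).toNat : Int) :=
          sumFrom_const _ q _ d hconst
        have hrec := ih (dmax + 1) (T + q * (dmax - d + 1)) (by omega) (by omega)
        simp only [blockLoop, if_pos hdM]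
        rw [← hq, ← hdmax, hrec, hsplit, sumFrom_split, hblock]
        have hcast : ((dmax + 1 - d).toNat : Int) = dmax + 1 - d := by omega
        rw [hcast]
        have harg : d + (dmax + 1 - d) = dmax + 1 := by ring
        rw [harg]
        ring
      · have h0 : (M + 1 - d).toNat = 0 := by omega
        simp [blockLoop, hdM, h0, sumFrom]

-- B's fold over range(1, M+1) computes the same reference sum
theorem foldl_eq_sumFrom (N : Int) (k : Nat) :
    ∀ (d T : Int),
      (PySem.List.pyRange d (d + k)).foldl (fun acc e => acc + PySem.Int.floordiv N e) T
        = T + sumFrom N k d := by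
  induction k with
  | zero =>
      intro d T
      simp [PySem.List.pyRange, sumFrom]
  | succ k ih =>
      intro d T
      have harg : d + ((k + 1 : Nat) : Int) = (d + 1) + (k : Int) := by push_cast; ring
      rw [harg, PySem.List.pyRange_one_cons (by omega)]
      simp only [List.foldl_cons]
      rw [ih (d + 1) (T + PySem.Int.floordiv N d)]
      simp only [sumFrom]
      ring

theorem solveUp_sqrt (n : Nat) :
    solveUp (n : Int) ((Nat.sqrt n : Nat) : Int) = ((Nat.sqrt n : Nat) : Int) := by
  rw [solveUp, dif_neg]
  have h := Nat.lt_succ_sqrt n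
  have h2 : ((n : Nat) : Int) < (((Nat.sqrt n + 1) * (Nat.sqrt n + 1) : Nat) : Int) := by
    exact_mod_cast h
  push_cast at h2
  intro hc
  linarith

theorem solveDown_sqrt (n : Nat) :
    solveDown (n : Int) (Nat.sqrt n) = ((Nat.sqrt n : Nat) : Int) := by
  have h := Nat.sqrt_le n
  cases hs : Nat.sqrt n with
  | zero => simp [solveDown]
  | succ m =>
      rw [hs] at h
      simp only [solveDown]
      rw [if_neg]
      · push_cast; ring
      · have h2 : (((m + 1) * (m + 1) : Nat) : Int) ≤ ((n : Nat) : Int) := by exact_mod_cast h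
        push_cast at h2
        intro hc
        linarith

-- ===== VERDICT (by name: the statement is the Claim_ definition above) =====
theorem solve_spec : Claim_equal_solve := by
  intro N _ hpre
  have hN : 0 ≤ N := hpre
  unfold Spec_solve solve solve_alt
  obtain ⟨n, rfl⟩ : ∃ n : Nat, N = (n : Int) := ⟨N.toNat, by omega⟩
  simp only [Int.toNat_natCast]
  rw [solveUp_sqrt n]
  simp only [Int.toNat_natCast]
  rw [solveDown_sqrt n]
  simp only [Int.toNat_natCast]
  have hM : ((Nat.sqrt n : Nat) : Int) * ((Nat.sqrt n : Nat) : Int) ≤ (n : Int) := by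
    exact_mod_cast Nat.sqrt_le n
  have hA := blockLoop_eq n ((Nat.sqrt n : Nat) : Int) hM (Nat.sqrt n + 1) 1 0 (by omega) (by omega)
  have hB := foldl_eq_sumFrom (n : Int) (Nat.sqrt n) 1 0
  have h1 : ((1 : Int) + (Nat.sqrt n : Nat)) = ((Nat.sqrt n : Nat) : Int) + 1 := by omega
  rw [h1] at hB
  have h2 : (((Nat.sqrt n : Nat) : Int) + 1 - 1).toNat = Nat.sqrt n := by omega
  rw [h2] at hA
  rw [hA, hB]
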